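-- pv_equiv track=rewrite | github.com/truera/trulens | src/core/trulens/core/database/migrations/data.py | _get_sql_alchemy_compatibility_version
-- ===== SOURCE A (Python) =====
-- from typing import Callable, Dict, List, Optional, Tuple
--
-- sql_alchemy_migration_versions: List[int] = [1, 2, 3, 4, 5, 6, 7, 8, 9, 10]
--
-- def _get_sql_alchemy_compatibility_version(version: int) -> int:
--     """Gets the last compatible version of a DB that needed data migration.
--
--     Args:
--         version: The alembic version
--
--     Returns:
--         int: An alembic version of the oldest compatible DB
--     """
--
--     for candidate_version in sorted(
--         sql_alchemy_migration_versions, reverse=True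
--     ):
--         if candidate_version <= version:
--             return candidate_version
--     raise ValueError(
--         f"The version given {version} is not compatible with any known version! Known versions: {sql_alchemy_migration_versions}"
--     )
-- ===== SOURCE B (Python) =====
-- import bisect
-- from typing import List
--
-- sql_alchemy_migration_versions: List[int] = [1, 2, 3, 4, 5, 6, 7, 8, 9, 10]
--
-- def _get_sql_alchemy_compatibility_version(version: int) -> int:
--     idx = bisect.bisect_right(sql_alchemy_migration_versions, version)
--     if idx == 0:
--         raise ValueError(
--             f"The version given {version} is not compatible with any known version! Known versions: {sql_alchemy_migration_versions}"
--         )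
--     return sql_alchemy_migration_versions[idx - 1]
-- ===== Notes on version B (the rewrite author's own statement) =====
-- stated objective: idiomatic
-- what changed: Replaces the reverse-sort-and-linear-scan with bisect.bisect_right on the already-ascending module constant, returning the element just before the insertion point.
import Mathlib
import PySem

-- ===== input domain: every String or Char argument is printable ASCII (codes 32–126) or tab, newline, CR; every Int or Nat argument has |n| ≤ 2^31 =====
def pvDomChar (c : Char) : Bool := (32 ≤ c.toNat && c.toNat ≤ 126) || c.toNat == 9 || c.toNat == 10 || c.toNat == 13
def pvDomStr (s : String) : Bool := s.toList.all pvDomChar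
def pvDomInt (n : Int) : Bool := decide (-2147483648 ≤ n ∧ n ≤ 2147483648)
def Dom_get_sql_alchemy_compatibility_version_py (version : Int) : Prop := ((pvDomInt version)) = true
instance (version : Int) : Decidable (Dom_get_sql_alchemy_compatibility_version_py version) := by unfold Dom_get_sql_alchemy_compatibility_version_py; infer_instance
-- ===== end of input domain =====

-- B replaces A's reverse-sort-and-linear-scan with bisect_right on the ascending constant (idiomatic).


-- ===== PORT A =====
def pvMigrationVersions : List Int := [1, 2, 3, 4, 5, 6, 7, 8, 9, 10]

-- the for-loop over sorted(..., reverse=True): first element ≤ version, none = ValueError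
def pvScanA (version : Int) : List Int → Option Int
  | [] => none
  | c :: rest => if c ≤ version then some c else pvScanA version rest

def get_sql_alchemy_compatibility_version_py (version : Int) : Int :=
  -- none (= the raise) is excluded by Pre_; the default is never reached there
  (pvScanA version (PySem.List.sorted pvMigrationVersions (fun x => x) true)).getD 0

-- ===== PORT B =====
def get_sql_alchemy_compatibility_version_py_alt (version : Int) : Int :=
  let idx := PySem.List.bisectRight pvMigrationVersions version
  if idx = 0 then 0  -- the raise, excluded by Pre_
  else pvMigrationVersions.getD (idx - 1) 0

-- ===== PRECONDITION & SPEC =====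
-- Pre_ excludes exactly the inputs where A raises ValueError: version below the smallest known version 1.
def Pre_get_sql_alchemy_compatibility_version_py (version : Int) : Prop := 1 ≤ version
instance (version : Int) : Decidable (Pre_get_sql_alchemy_compatibility_version_py version) := by unfold Pre_get_sql_alchemy_compatibility_version_py; infer_instance
def pvWitness_get_sql_alchemy_compatibility_version_py : Int := 7

def Spec_get_sql_alchemy_compatibility_version_py (version : Int) (out : Int) : Prop := out = get_sql_alchemy_compatibility_version_py_alt version
instance (version : Int) (out : Int) : Decidable (Spec_get_sql_alchemy_compatibility_version_py version out) := by unfold Spec_get_sql_alchemy_compatibility_version_py; infer_instance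

-- ===== CLAIM (what is proved, stated in full; the proofs are below) =====
def Claim_equal_get_sql_alchemy_compatibility_version_py : Prop := ∀ (version : Int), Dom_get_sql_alchemy_compatibility_version_py version → Pre_get_sql_alchemy_compatibility_version_py version → Spec_get_sql_alchemy_compatibility_version_py version (get_sql_alchemy_compatibility_version_py version)

-- ===== LEMMAS AND PROOFS =====

lemma pvSortedRev : PySem.List.sorted pvMigrationVersions (fun x => x) true
    = [10, 9, 8, 7, 6, 5, 4, 3, 2, 1] := by decide

lemma pvA_eq (v : Int) (h : 1 ≤ v) :
    get_sql_alchemy_compatibility_version_py v = if 10 ≤ v then 10 else v := by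
  unfold get_sql_alchemy_compatibility_version_py
  rw [pvSortedRev]
  simp only [pvScanA]
  split_ifs <;> simp_all <;> omega

lemma pvGetVal (j : Nat) (hj : j < pvMigrationVersions.length) :
    pvMigrationVersions[j] = (j : Int) + 1 := by
  have hj10 : j < 10 := by simpa [pvMigrationVersions] using hj
  interval_cases j <;> rfl

lemma pvIdx (v : Int) (h : 1 ≤ v) :
    PySem.List.bisectRight pvMigrationVersions v = if 10 ≤ v then 10 else v.toNat := by
  obtain ⟨hle, hlt, hgt⟩ := PySem.List.bisectRight_spec pvMigrationVersions v (by decide)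
  set idx := PySem.List.bisectRight pvMigrationVersions v with hidx
  have hle10 : idx ≤ 10 := by simpa [pvMigrationVersions] using hle
  have h1 : ∀ j : Nat, j < pvMigrationVersions.length → j < idx → (j : Int) + 1 ≤ v := by
    intro j hj hji
    have := hlt j hj hji
    simp only [pvGetVal] at this
    exact this
  have h2 : ∀ j : Nat, j < pvMigrationVersions.length → idx ≤ j → v < (j : Int) + 1 := by
    intro j hj hji
    have := hgt j hj hji
    simp only [pvGetVal] at this
    exact this
  have hlen : pvMigrationVersions.length = 10 := by decide
  split_ifs with h10
  · by_contra hne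
    have := h2 idx (by omega) le_rfl
    omega
  · rcases Nat.lt_trichotomy idx v.toNat with hc | hc | hc
    · have := h2 idx (by omega) le_rfl
      omega
    · exact hc
    · have := h1 (idx - 1) (by omega) (by omega)
      omega

lemma pvB_eq (v : Int) (h : 1 ≤ v) :
    get_sql_alchemy_compatibility_version_py_alt v = if 10 ≤ v then 10 else v := by
  unfold get_sql_alchemy_compatibility_version_py_alt
  rw [pvIdx v h]
  split_ifs with h10
  · decide
  · have hne : v.toNat ≠ 0 := by omega
    have hj : v.toNat - 1 < pvMigrationVersions.length := by
      simp only [pvMigrationVersions]; simp; omega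
    show (if v.toNat = 0 then 0 else pvMigrationVersions.getD (v.toNat - 1) 0) = v
    rw [if_neg hne, List.getD_eq_getElem _ _ hj]
    simp only [pvGetVal]
    omega

-- ===== VERDICT (by name: the statement is the Claim_ definition above) =====
theorem get_sql_alchemy_compatibility_version_py_spec : Claim_equal_get_sql_alchemy_compatibility_version_py := by
  intro v _ hpre
  unfold Spec_get_sql_alchemy_compatibility_version_py
  rw [pvA_eq v hpre, pvB_eq v hpre]
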